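-- pv_equiv track=rewrite | github.com/JonathanBirkel/MN_SynopticWarming | wrf_process.py | ssc_decode
-- ===== SOURCE A (Python) =====
-- def TypeAgg(code, MTplus=1, DTplus=0): # number of "pluses" to leave unaggregated
--     ssctype = int(code)
--     if ssctype in range(61,70):
--         if ssctype > 60 + MTplus:
--             rounddown = 60 + MTplus
--         else:
--             rounddown = ssctype
--     elif ssctype in range(31,40):
--         if ssctype > 30 + DTplus:
--             rounddown = 30 + DTplus
--         else:
--             rounddown = ssctype
--     else:
--         rounddown = int(ssctype/10) * 10
--     return rounddown
--
-- def ssc_decode(ssctype):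
--     typeagg = TypeAgg(ssctype, 0, 0)
--     code_dict = {0:'', 10:'DM', 20:'DP', 30:'DT', 40:'MM', 50:'MP', 60:'MT', 70:'TR'}
--
--     if ssctype == 99:
--         return 'All'
--     else:
--         decode = code_dict[typeagg]
--         pluses = ssctype-typeagg
--         for p in range(pluses):
--             decode = decode + '+'
--         return decode
-- ===== SOURCE B (Python) =====
-- # Precompute the complete code -> label table once; answering a query is a single dict lookup.
-- _SSC_TABLE = {99: 'All'}
-- for _base, _label in [(0, ''), (10, 'DM'), (20, 'DP'), (30, 'DT'),
--                       (40, 'MM'), (50, 'MP'), (60, 'MT'), (70, 'TR')]: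
--     for _extra in range(10):
--         _SSC_TABLE[_base + _extra] = _label + '+' * _extra
--
-- def ssc_decode(ssctype):
--     return _SSC_TABLE[ssctype]
-- ===== Notes on version B (the rewrite author's own statement) =====
-- stated objective: alternative
-- what changed: Replaces the per-call arithmetic (range-branch floor-to-tens helper plus a plus-appending loop) with a lookup table of every valid code precomputed once at module load; each call is a single dict lookup.
-- outside the precondition, e.g. on ssc_decode(-5): A returns '', B raises KeyError; on ssc_decode(-10): A raises KeyError, B raises KeyError; on ssc_decode(80): A raises KeyError, B raises KeyError
import Mathlib
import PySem

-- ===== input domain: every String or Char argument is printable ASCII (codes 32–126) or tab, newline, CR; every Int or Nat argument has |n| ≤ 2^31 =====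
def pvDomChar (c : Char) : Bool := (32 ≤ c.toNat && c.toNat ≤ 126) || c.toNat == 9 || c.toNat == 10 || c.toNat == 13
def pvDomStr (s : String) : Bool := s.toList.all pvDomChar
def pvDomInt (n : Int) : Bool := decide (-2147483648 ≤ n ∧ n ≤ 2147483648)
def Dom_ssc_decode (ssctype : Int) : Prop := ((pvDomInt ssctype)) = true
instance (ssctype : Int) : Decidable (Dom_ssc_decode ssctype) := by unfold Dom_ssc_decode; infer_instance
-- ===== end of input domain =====

set_option maxRecDepth 4096


-- ===== PORT A =====
-- ssc_decode: decode an SSC weather-type integer code to its string label.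
-- B replaces per-call arithmetic with a table of all valid codes built once; same cost per table, O(1) per call.
-- Python `int(ssctype/10) * 10`: true division then truncation toward zero; exact as
-- Int.tdiv on this domain (|n| ≤ 2^31, where float division rounds to the right integer side).
def TypeAgg (code : Int) (MTplus : Int) (DTplus : Int) : Int :=
  let ssctype := code
  if 61 ≤ ssctype ∧ ssctype < 70 then
    if ssctype > 60 + MTplus then 60 + MTplus else ssctype
  else if 31 ≤ ssctype ∧ ssctype < 40 then
    if ssctype > 30 + DTplus then 30 + DTplus else ssctype
  else
    ssctype.tdiv 10 * 10

def sscCodeDict : PySem.Dict Int String :=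
  PySem.Dict.ofList [(0, ""), (10, "DM"), (20, "DP"), (30, "DT"),
                     (40, "MM"), (50, "MP"), (60, "MT"), (70, "TR")]

def ssc_decode (ssctype : Int) : String :=
  let typeagg := TypeAgg ssctype 0 0
  if ssctype = 99 then "All"
  else
    -- code_dict[typeagg]: KeyError (= none) excluded by Pre_
    let decode := (sscCodeDict.get? typeagg).getD ""
    let pluses := ssctype - typeagg
    (PySem.List.pyRange 0 pluses 1).foldl (fun d _ => d ++ "+") decode

-- ===== PORT B =====
-- module-level table: for each (base, label), insert base+extra ↦ label + '+'*extra for extra in range(10)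
def sscTable : PySem.Dict Int String :=
  ([(0, ""), (10, "DM"), (20, "DP"), (30, "DT"),
    (40, "MM"), (50, "MP"), (60, "MT"), (70, "TR")] : List (Int × String)).foldl
    (fun t bl =>
      (PySem.List.pyRange 0 10 1).foldl
        (fun t extra => t.insert (bl.1 + extra) (bl.2 ++ String.ofList (List.replicate extra.toNat '+'))) t)
    (PySem.Dict.ofList [(99, "All")])

def ssc_decode_alt (ssctype : Int) : String :=
  -- _SSC_TABLE[ssctype]: KeyError (= none) excluded by Pre_
  (sscTable.get? ssctype).getD ""

-- ===== PRECONDITION & SPEC =====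
-- Pre_ excludes the inputs where a program raises KeyError: both raise on codes whose tens value is
-- not a dict key; additionally the one-digit negative codes are excluded, where A's empty-string return
-- is an artefact of truncation toward zero producing a negative plus count, while B's table naturally
-- has no such keys and raises KeyError (see the cited example).
def Pre_ssc_decode (ssctype : Int) : Prop := (0 ≤ ssctype ∧ ssctype ≤ 79) ∨ ssctype = 99
instance (ssctype : Int) : Decidable (Pre_ssc_decode ssctype) := by unfold Pre_ssc_decode; infer_instance
def pvWitness_ssc_decode : Int := (65)

def Spec_ssc_decode (ssctype : Int) (out : String) : Prop := out = ssc_decode_alt ssctype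
instance (ssctype : Int) (out : String) : Decidable (Spec_ssc_decode ssctype out) := by unfold Spec_ssc_decode; infer_instance

-- ===== CLAIM =====
def Claim_equal_ssc_decode : Prop := ∀ (ssctype : Int), Dom_ssc_decode ssctype → Pre_ssc_decode ssctype → Spec_ssc_decode ssctype (ssc_decode ssctype)

-- ===== LEMMAS AND PROOFS =====
lemma ssc_decode_agree (ssctype : Int) (h0 : 0 ≤ ssctype) (h79 : ssctype ≤ 79) :
    ssc_decode ssctype = ssc_decode_alt ssctype := by
  interval_cases ssctype <;> decide

-- ===== VERDICT =====
theorem ssc_decode_spec : Claim_equal_ssc_decode := by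
  intro ssctype _ hpre
  unfold Spec_ssc_decode
  rcases hpre with ⟨h0, h79⟩ | h99
  · exact ssc_decode_agree ssctype h0 h79
  · subst h99; decide
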